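-- pv_equiv track=rewrite | github.com/gauravrana05/ProblemsDaily | gaurav/Courses/PDSA/Live Sessions/Week2/subordinates.py | subordinates
-- ===== SOURCE A (Python) =====
-- def subordinates(L):
--     if len(L) == 1:
--         return (L, 1)
--     if len(L) == 2:
--         return (sorted(L), 1)
--
--     mid = len(L) // 2
--
--     left, lcount = subordinates(L[:mid])
--     right, rcount = subordinates(L[mid:])
--
--     ret = []
--
--     i, j = 0, 0
--
--     while i < len(left) and j < len(right):
--         if left[i] <= right[j]:
--             ret.append(left[i])
--             i+= 1
--         else:
--             ret.append(right[j])
--             j+=1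
--     while(i < len(left)):
--         ret.append(left[i])
--         i+=1
--
--     while(j < len(right)):
--         ret.append(right[j])
--         j+=1
--
--     return (ret, 1 + rcount+lcount)
-- ===== SOURCE B (Python) =====
-- def count(n):
--     # recursion-node count of merge sort on a list of length n
--     if n == 1 or n == 2:
--         return 1
--     return 1 + count(n // 2) + count(n - n // 2)
--
-- def subordinates(L):
--     return (sorted(L), count(len(L)))
-- ===== Notes on version B (the rewrite author's own statement) =====
-- stated objective: simpler
-- what changed: B splits A's fused manual merge-sort-with-count into two independent computations: the builtin stable sorted(L) for the list and a standalone length-only recursion count(len(L)) for the node count.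
import Mathlib
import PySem

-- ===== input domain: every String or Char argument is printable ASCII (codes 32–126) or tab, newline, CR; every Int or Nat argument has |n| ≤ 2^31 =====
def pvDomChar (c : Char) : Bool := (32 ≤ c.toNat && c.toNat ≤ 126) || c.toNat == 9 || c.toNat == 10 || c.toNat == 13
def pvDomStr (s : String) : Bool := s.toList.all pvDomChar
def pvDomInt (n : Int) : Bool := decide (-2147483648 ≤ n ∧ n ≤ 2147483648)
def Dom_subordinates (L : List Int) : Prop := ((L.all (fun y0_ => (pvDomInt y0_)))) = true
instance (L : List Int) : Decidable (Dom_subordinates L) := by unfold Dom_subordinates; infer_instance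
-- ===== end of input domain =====

-- B replaces A's fused manual merge-sort-with-count by the library stable sort plus a
-- standalone length-only recursion for the node count (objective: simpler).
-- Both Pythons raise RecursionError on the empty list; Pre_ excludes it.

-- ===== PORT A =====
-- the two while-loop merges of A, as the obvious structural recursion on (left, right)
def mergeA : List Int → List Int → List Int
  | [], ys => ys
  | x :: xs, [] => x :: xs
  | x :: xs, y :: ys =>
    if x ≤ y then x :: mergeA xs (y :: ys) else y :: mergeA (x :: xs) ys

def subordinates (L : List Int) : List Int × Int :=
  if L.length ≤ 1 then (L, 1)   -- Python recurses forever on []; Pre_ excludes it (len==1 branch of A)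
  else if L.length = 2 then (PySem.List.sorted L (fun x => x) false, 1)
  else
    let mid := L.length / 2
    let lp := subordinates (PySem.List.slice L none (some (mid : Int)))
    let rp := subordinates (PySem.List.slice L (some (mid : Int)) none)
    (mergeA lp.1 rp.1, 1 + rp.2 + lp.2)
termination_by L.length
decreasing_by
  all_goals
    simp only [PySem.List.slice_to_natCast, PySem.List.slice_from_natCast,
      List.length_take, List.length_drop]
    omega

-- ===== PORT B =====
-- recursion-node count of merge sort on a list of length n
def countB (n : Nat) : Int :=
  if n ≤ 2 then 1   -- Python recurses forever on n = 0; Pre_ excludes it (n==1 or n==2 branch of B)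
  else 1 + countB (n / 2) + countB (n - n / 2)
decreasing_by all_goals omega

def subordinates_alt (L : List Int) : List Int × Int :=
  (PySem.List.sorted L (fun x => x) false, countB L.length)

-- ===== PRECONDITION & SPEC =====
-- Pre_ excludes only the empty list, on which both A and B raise RecursionError.
def Pre_subordinates (L : List Int) : Prop := L ≠ []
instance (L : List Int) : Decidable (Pre_subordinates L) := by unfold Pre_subordinates; infer_instance
def pvWitness_subordinates : List Int := ([3, 1, 2])

def Spec_subordinates (L : List Int) (out : List Int × Int) : Prop := out = subordinates_alt L
instance (L : List Int) (out : List Int × Int) : Decidable (Spec_subordinates L out) := by unfold Spec_subordinates; infer_instance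

-- ===== CLAIM (what is proved, stated in full; the proofs are below) =====
def Claim_equal_subordinates : Prop := ∀ (L : List Int), Dom_subordinates L → Pre_subordinates L → Spec_subordinates L (subordinates L)

-- ===== LEMMAS AND PROOFS =====

theorem mergeA_eq_merge (xs ys : List Int) :
    mergeA xs ys = List.merge xs ys (fun a b => a ≤ b) := by
  induction xs generalizing ys with
  | nil => cases ys <;> simp [mergeA]
  | cons x xs ih =>
    induction ys with
    | nil => simp [mergeA]
    | cons y ys ihy =>
      by_cases h : x ≤ y <;> simp [mergeA, h, ih, ihy]

theorem mergeA_perm (xs ys : List Int) : (mergeA xs ys).Perm (xs ++ ys) := by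
  rw [mergeA_eq_merge]; exact List.merge_perm_append _

theorem mergeA_pairwise {xs ys : List Int}
    (hx : xs.Pairwise (· ≤ ·)) (hy : ys.Pairwise (· ≤ ·)) :
    (mergeA xs ys).Pairwise (· ≤ ·) := by
  rw [mergeA_eq_merge]
  simpa using List.pairwise_merge (le := fun a b => decide (a ≤ b))
    (fun a b c h1 h2 => by simp at h1 h2 ⊢; omega)
    (fun a b => by by_cases h : a ≤ b <;> simp [h]; omega) xs ys
    (by simpa using hx) (by simpa using hy)

-- the sorted-list component of A is the library sort
theorem subordinates_fst (L : List Int) : (subordinates L).1 = PySem.List.sorted L (fun x => x) false := by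
  generalize hn : L.length = n
  induction n using Nat.strong_induction_on generalizing L with
  | _ n ih =>
  rw [subordinates]
  by_cases h1 : L.length ≤ 1
  · rw [if_pos h1]
    rcases L with _ | ⟨a, _ | ⟨b, t⟩⟩
    · rfl
    · simp [PySem.List.sorted, PySem.List.insertBy]
    · simp at h1
  · by_cases h2 : L.length = 2
    · simp [h2]
    · simp only [h1, h2, if_false]
      have hm : 1 ≤ L.length / 2 ∧ L.length / 2 < L.length := by omega
      have hL : PySem.List.slice L none (some ((L.length / 2 : Nat) : Int)) = L.take (L.length / 2) :=
        PySem.List.slice_to_natCast ..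
      have hR : PySem.List.slice L (some ((L.length / 2 : Nat) : Int)) none = L.drop (L.length / 2) :=
        PySem.List.slice_from_natCast ..
      simp only [hL, hR]
      have ihl := ih (L.take (L.length / 2)).length (by simp; omega) _ rfl
      have ihr := ih (L.drop (L.length / 2)).length (by simp; omega) _ rfl
      simp only [ihl, ihr]
      have hperm : (mergeA (PySem.List.sorted (L.take (L.length / 2)) (fun x => x) false)
          (PySem.List.sorted (L.drop (L.length / 2)) (fun x => x) false)).Perm L := by
        refine ((mergeA_perm _ _).trans ?_)
        refine (List.Perm.append (PySem.List.sorted_perm ..) (PySem.List.sorted_perm ..)).trans ?_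
        simp [List.take_append_drop]
      have hpw := mergeA_pairwise
        (by simpa using PySem.List.sorted_pairwise (xs := L.take (L.length / 2)) (key := fun x : Int => x))
        (by simpa using PySem.List.sorted_pairwise (xs := L.drop (L.length / 2)) (key := fun x : Int => x))
      exact (PySem.List.sorted_id_eq_of_perm_of_pairwise _ _ hperm hpw).symm

-- the count component of A is countB of the length
theorem subordinates_snd (L : List Int) : (subordinates L).2 = countB L.length := by
  generalize hn : L.length = n
  induction n using Nat.strong_induction_on generalizing L with
  | _ n ih =>
  rw [subordinates]
  by_cases h1 : L.length ≤ 1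
  · rw [if_pos h1, countB, if_pos (by omega)]
  · by_cases h2 : L.length = 2
    · rw [if_neg h1, if_pos h2, countB, if_pos (by omega)]
    · simp only [h1, h2, if_false]
      have hL : PySem.List.slice L none (some ((L.length / 2 : Nat) : Int)) = L.take (L.length / 2) :=
        PySem.List.slice_to_natCast ..
      have hR : PySem.List.slice L (some ((L.length / 2 : Nat) : Int)) none = L.drop (L.length / 2) :=
        PySem.List.slice_from_natCast ..
      simp only [hL, hR]
      have ihl := ih (L.take (L.length / 2)).length (by simp; omega) _ rfl
      have ihr := ih (L.drop (L.length / 2)).length (by simp; omega) _ rfl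
      simp only [ihl, ihr, List.length_take, List.length_drop]
      rw [← hn]
      conv_rhs => rw [countB]
      rw [if_neg (by omega : ¬ L.length ≤ 2),
        (by omega : min (L.length / 2) L.length = L.length / 2)]
      ring

-- ===== VERDICT (by name: the statement is the Claim_ definition above) =====
theorem subordinates_spec : Claim_equal_subordinates := by
  intro L _ _
  show _ = _
  have h1 := subordinates_fst L
  have h2 := subordinates_snd L
  unfold subordinates_alt
  exact Prod.ext h1 h2
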